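-- pv_equiv track=rewrite | github.com/DylanCheong-tech/UOW-CSIT321-Project-Oct2022-March2023 | evoting/homo_encryption.py | homo_counting
-- ===== SOURCE A (Python) =====
-- def homo_counting(casted_votes:list) -> (list, int):
-- 	return_list = []
-- 	subresult = 1
-- 	counted_vote = 0
--
-- 	for index, vote in zip(range(len(casted_votes)), casted_votes):
-- 		subresult = subresult * vote
-- 		counted_vote = counted_vote + 1
--
-- 		if (index + 1) % 10 == 0:
-- 			return_list.append(subresult)
-- 			subresult = 1
--
--
-- 	if subresult != 1:
-- 		return_list.append(subresult)
--
-- 	return return_list, counted_vote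
-- ===== SOURCE B (Python) =====
-- def homo_counting(casted_votes: list) -> (list, int):
--     # Chunked pass: slice 10 votes at a time; a full chunk always emits its
--     # product, a short trailing chunk emits it only when it is not 1.
--     n = len(casted_votes)
--     out = []
--     for i in range(0, n, 10):
--         chunk = casted_votes[i:i + 10]
--         p = 1
--         for v in chunk:
--             p = p * v
--         if len(chunk) == 10 or p != 1:
--             out.append(p)
--     return out, n
-- ===== Notes on version B (the rewrite author's own statement) =====
-- stated objective: simpler
-- what changed: Replaces the single indexed pass with modulo bookkeeping and a trailing-remainder flush by a recursion over 10-element chunks (full chunk: always emit its product; partial trailing chunk: emit only if the product is not 1), and returns len(casted_votes) directly as the count.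
import Mathlib
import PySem

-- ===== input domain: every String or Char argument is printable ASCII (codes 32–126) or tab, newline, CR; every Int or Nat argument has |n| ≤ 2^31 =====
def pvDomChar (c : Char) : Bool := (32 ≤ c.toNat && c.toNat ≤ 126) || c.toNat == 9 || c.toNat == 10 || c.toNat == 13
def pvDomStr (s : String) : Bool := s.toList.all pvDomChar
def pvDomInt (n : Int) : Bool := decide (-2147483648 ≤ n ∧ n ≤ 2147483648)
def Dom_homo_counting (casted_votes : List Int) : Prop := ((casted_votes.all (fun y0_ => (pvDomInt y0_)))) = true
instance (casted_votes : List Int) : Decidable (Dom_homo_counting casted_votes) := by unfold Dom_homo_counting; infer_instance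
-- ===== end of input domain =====

-- B slices the vote list into 10-element chunks instead of A's indexed pass with modulo bookkeeping; same values, same cost (objective: simpler).

-- ===== PORT A =====
-- loop body of A's for-loop: state is (return_list, subresult, counted_vote)
def stepA (st : List Int × Int × Int) (iv : Nat × Int) : List Int × Int × Int :=
  let subresult := st.2.1 * iv.2
  let counted := st.2.2 + 1
  if (iv.1 + 1) % 10 = 0 then (st.1 ++ [subresult], 1, counted) else (st.1, subresult, counted)

-- A's final `if subresult != 1` flush and return
def finishA (st : List Int × Int × Int) : List Int × Int :=
  (if st.2.1 ≠ 1 then st.1 ++ [st.2.1] else st.1, st.2.2)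

def homo_counting (casted_votes : List Int) : List Int × Int :=
  finishA (((List.range casted_votes.length).zip casted_votes).foldl stepA ([], 1, 0))

-- ===== PORT B =====
-- loop body of B's `for i in range(0, n, 10)` loop over the chunk start indices
def stepB (casted_votes : List Int) (out : List Int) (i : Int) : List Int :=
  let chunk := PySem.List.slice casted_votes (some i) (some (i + 10))
  let p := chunk.foldl (· * ·) 1
  if chunk.length = 10 ∨ p ≠ 1 then out ++ [p] else out

def homo_counting_alt (casted_votes : List Int) : List Int × Int :=
  let n : Int := casted_votes.length
  ((PySem.List.pyRange 0 n 10).foldl (stepB casted_votes) [], n)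

-- ===== PRECONDITION & SPEC =====
def Spec_homo_counting (casted_votes : List Int) (out : List Int × Int) : Prop := out = homo_counting_alt casted_votes
instance (casted_votes : List Int) (out : List Int × Int) : Decidable (Spec_homo_counting casted_votes out) := by unfold Spec_homo_counting; infer_instance

-- ===== CLAIM (what is proved, stated in full; the proofs are below) =====
def Claim_equal_homo_counting : Prop := ∀ (casted_votes : List Int), Dom_homo_counting casted_votes → Spec_homo_counting casted_votes (homo_counting casted_votes)

-- ===== LEMMAS AND PROOFS =====

-- proof-only intermediate form: the chunk decomposition both ports compute
def altChunks (rest : List Int) : List Int :=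
  if _h : rest = [] then []
  else
    let chunk := rest.take 10
    let rest2 := rest.drop 10
    let p := chunk.foldl (· * ·) 1
    let tail := altChunks rest2
    if chunk.length = 10 ∨ p ≠ 1 then p :: tail else tail
termination_by rest.length
decreasing_by
  simp only [List.length_drop]
  cases rest with
  | nil => exact absurd rfl _h
  | cons a l => simp

theorem pyRange10_nil (a b : Int) (h : b ≤ a) : PySem.List.pyRange a b 10 = [] := by
  rw [PySem.List.pyRange_of_pos a b (by norm_num)]
  rw [if_neg (by omega)]
  simp

theorem pyRange10_cons (a b : Int) (h : a < b) :
    PySem.List.pyRange a b 10 = a :: PySem.List.pyRange (a + 10) b 10 := by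
  rw [PySem.List.pyRange_of_pos a b (by norm_num), PySem.List.pyRange_of_pos (a + 10) b (by norm_num)]
  rw [if_pos h]
  have hcnt : ((b - a + 10 - 1) / 10).toNat
      = (if a + 10 < b then ((b - (a + 10) + 10 - 1) / 10).toNat else 0) + 1 := by
    split_ifs with h2 <;> omega
  rw [hcnt, List.range_succ_eq_map, List.map_cons, List.map_map]
  refine congrArg₂ _ (by simp) (List.map_congr_left ?_)
  intro k _
  simp [Function.comp]
  ring


-- altChunks on a short (final) list: at most one element is emitted
theorem altChunks_small (xs : List Int) (h : xs.length < 10) :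
    altChunks xs = if xs.foldl (· * ·) 1 ≠ 1 then [xs.foldl (· * ·) 1] else [] := by
  rw [altChunks]
  by_cases hne : xs = []
  · subst hne; simp
  · rw [dif_neg hne]
    have ht : xs.take 10 = xs := List.take_of_length_le (by omega)
    have hd : xs.drop 10 = [] := List.drop_eq_nil_of_le (by omega)
    have hc : ¬ xs.length = 10 := by omega
    have hnil : altChunks ([] : List Int) = [] := by rw [altChunks]; simp
    simp only [ht, hd, hnil]
    by_cases hp : List.foldl (fun x1 x2 => x1 * x2) 1 xs ≠ 1
    · rw [if_pos (Or.inr hp), if_pos hp]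
    · rw [if_neg (not_or.mpr ⟨hc, hp⟩), if_neg hp]

-- altChunks on a list with at least 10 elements: the first full chunk is emitted
theorem altChunks_big (xs : List Int) (h : 10 ≤ xs.length) :
    altChunks xs = (xs.take 10).foldl (· * ·) 1 :: altChunks (xs.drop 10) := by
  rw [altChunks]
  have hne : xs ≠ [] := by intro he; subst he; simp at h
  rw [dif_neg hne]
  rw [if_pos (Or.inl (by simp; omega))]

-- a run of loop iterations in which no index triggers the `% 10 == 0` append
theorem foldl_stepA_run (ys : List Int) : ∀ (k : Nat), (∀ j, j < ys.length → (k + j + 1) % 10 ≠ 0) →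
    ∀ (rl : List Int) (s c : Int),
    ((List.range' k ys.length).zip ys).foldl stepA (rl, s, c)
      = (rl, ys.foldl (· * ·) s, c + ys.length) := by
  induction ys with
  | nil => intro k _ rl s c; simp
  | cons y ys ih =>
      intro k h rl s c
      have h0 : (k + 0 + 1) % 10 ≠ 0 := h 0 (by simp)
      have : List.range' k (y :: ys).length = k :: List.range' (k + 1) ys.length := by
        simp [List.range'_succ]
      rw [this]
      simp only [List.zip_cons_cons, List.foldl_cons]
      have hstep : stepA (rl, s, c) (k, y) = (rl, s * y, c + 1) := by
        simp [stepA]; omega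
      rw [hstep, ih (k + 1) (fun j hj => by
        have := h (j + 1) (by simpa using Nat.succ_lt_succ hj)
        omega)]
      simp only [List.length_cons]
      refine Prod.ext rfl (Prod.ext rfl ?_)
      push_cast; ring

theorem main_chunks (n : Nat) : ∀ (xs : List Int), xs.length ≤ n → ∀ (k : Nat), k % 10 = 0 →
    ∀ (rl : List Int) (c : Int),
    finishA (((List.range' k xs.length).zip xs).foldl stepA (rl, 1, c))
      = (rl ++ altChunks xs, c + xs.length) := by
  induction n with
  | zero =>
      intro xs hx k _ rl c
      have hxe : xs = [] := List.eq_nil_of_length_eq_zero (Nat.le_zero.mp hx)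
      subst hxe
      simp [finishA, altChunks]
  | succ n ih =>
      intro xs hx k hk rl c
      by_cases hlen : xs.length < 10
      · -- a (possibly empty) trailing partial chunk: no append inside the loop
        rw [foldl_stepA_run xs k (fun j hj => by omega) rl 1 c]
        rw [altChunks_small xs hlen]
        by_cases hp : xs.foldl (· * ·) 1 ≠ 1
        · simp [finishA, hp]
        · simp at hp; simp [finishA, hp]
      · -- a full chunk of 10, then recurse
        have hxne : xs ≠ [] := by intro h; subst h; simp at hlen
        -- split xs = first 9 ++ [10th] ++ rest
        have h9 : 9 < xs.length := by omega
        obtain ⟨u, z, d, hsplit, hu⟩ :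
            ∃ u z d, xs = u ++ z :: d ∧ u.length = 9 := by
          refine ⟨xs.take 9, xs[9], xs.drop 10, ?_, by simp; omega⟩
          conv_lhs => rw [← List.take_append_drop 9 xs, List.drop_eq_getElem_cons h9]
        subst hsplit
        have hlentot : (u ++ z :: d).length = 10 + d.length := by simp [hu]; omega
        rw [hlentot]
        have hrange : List.range' k (10 + d.length)
            = (List.range' k 9 ++ [k + 9]) ++ List.range' (k + 10) d.length := by
          rw [show List.range' k 9 ++ [k + 9] = List.range' k 10 by
                have := @List.range'_append k 9 1 1
                simpa using this]
          have := @List.range'_append k 10 d.length 1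
          simpa using this.symm -- range' split
        rw [hrange]
        have hzip : ((List.range' k 9 ++ [k + 9]) ++ List.range' (k + 10) d.length).zip
              (u ++ z :: d)
            = ((List.range' k 9).zip u ++ [(k + 9, z)]) ++ (List.range' (k + 10) d.length).zip d := by
          rw [show u ++ z :: d = (u ++ [z]) ++ d by simp]
          rw [List.zip_append (by simp [hu])]
          rw [List.zip_append (by simp [hu])]
          simp
        rw [hzip, List.foldl_append, List.foldl_append]
        have hrun : ((List.range' k 9).zip u).foldl stepA (rl, 1, c)
            = (rl, u.foldl (· * ·) 1, c + 9) := by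
          have h := foldl_stepA_run u k (fun j hj => by omega) rl 1 c
          rw [hu] at h
          simpa using h
        rw [hrun]
        have hstep : [(k + 9, z)].foldl stepA (rl, u.foldl (· * ·) 1, c + 9)
            = (rl ++ [u.foldl (· * ·) 1 * z], 1, c + 10) := by
          have hmod : (k + 9 + 1) % 10 = 0 := by omega
          simp [stepA, hmod]
          try omega
        rw [hstep]
        have hdlen : d.length ≤ n := by
          have := hx; simp [hu] at this; omega
        have := ih d hdlen (k + 10) (by omega) (rl ++ [u.foldl (· * ·) 1 * z]) (c + 10)
        rw [this]
        -- altChunks on a list with a full first chunk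
        have htake : (u ++ z :: d).take 10 = u ++ [z] := by
          rw [show u ++ z :: d = (u ++ [z]) ++ d by simp, List.take_append_of_le_length (by simp [hu])]
          exact List.take_of_length_le (by simp [hu])
        have hdrop : (u ++ z :: d).drop 10 = d := by
          rw [show u ++ z :: d = (u ++ [z]) ++ d by simp, List.drop_append_of_le_length (by simp [hu])]
          simp [hu]
        rw [altChunks_big (u ++ z :: d) (by simp [hu]; omega)]
        simp only [htake, hdrop]
        have hp : (u ++ [z]).foldl (· * ·) 1 = u.foldl (· * ·) 1 * z := by
          rw [List.foldl_append]; simp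
        rw [hp]
        refine Prod.ext (by simp) ?_
        simp; ring

-- B's fold over the chunk start indices computes the chunk decomposition
theorem foldl_stepB_bridge (ys : List Int) (m : Nat) : ∀ (i : Nat), ys.length ≤ i + m →
    ∀ (acc : List Int),
    (PySem.List.pyRange (i : Int) (ys.length : Int) 10).foldl (stepB ys) acc
      = acc ++ altChunks (ys.drop i) := by
  induction m with
  | zero =>
      intro i hi acc
      rw [pyRange10_nil _ _ (by exact_mod_cast by omega)]
      rw [List.drop_eq_nil_of_le (by omega)]
      rw [show altChunks [] = [] from by rw [altChunks]; simp]
      simp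
  | succ m ih =>
      intro i hi acc
      by_cases hlt : i < ys.length
      · rw [pyRange10_cons _ _ (by exact_mod_cast hlt), List.foldl_cons]
        have hslice : PySem.List.slice ys (some (i : Int)) (some ((i : Int) + 10))
            = (ys.drop i).take 10 := by
          have := PySem.List.slice_natCast_add ys i 10
          simpa using this
        have hne : ys.drop i ≠ [] := by
          intro he
          have := congrArg List.length he
          simp at this
          omega
        have hstep : ∀ (out : List Int), stepB ys out (i : Int)
            = if ((ys.drop i).take 10).length = 10 ∨ ((ys.drop i).take 10).foldl (· * ·) 1 ≠ 1
              then out ++ [((ys.drop i).take 10).foldl (· * ·) 1] else out := by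
          intro out
          simp only [stepB, hslice]
        have hchunks : altChunks (ys.drop i)
            = if ((ys.drop i).take 10).length = 10 ∨ ((ys.drop i).take 10).foldl (· * ·) 1 ≠ 1
              then ((ys.drop i).take 10).foldl (· * ·) 1 :: altChunks (ys.drop (i + 10))
              else altChunks (ys.drop (i + 10)) := by
          rw [altChunks, dif_neg hne]
          simp only [List.drop_drop]
        have hcast : (i : Int) + 10 = ((i + 10 : Nat) : Int) := by push_cast; ring
        rw [hstep, hchunks, hcast]
        by_cases hc : ((ys.drop i).take 10).length = 10 ∨ ((ys.drop i).take 10).foldl (· * ·) 1 ≠ 1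
        · rw [if_pos hc, if_pos hc, ih (i + 10) (by omega) (acc ++ [((ys.drop i).take 10).foldl (· * ·) 1])]
          simp
        · rw [if_neg hc, if_neg hc, ih (i + 10) (by omega) acc]
      · rw [pyRange10_nil _ _ (by exact_mod_cast by omega)]
        rw [List.drop_eq_nil_of_le (by omega)]
        rw [show altChunks [] = [] from by rw [altChunks]; simp]
        simp

-- ===== VERDICT (by name: the statement is the Claim_ definition above) =====
theorem homo_counting_spec : Claim_equal_homo_counting := by
  intro xs _
  unfold Spec_homo_counting homo_counting homo_counting_alt
  rw [List.range_eq_range']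
  rw [main_chunks xs.length xs le_rfl 0 (by simp) [] 0]
  have hb := foldl_stepB_bridge xs xs.length 0 (by omega) []
  simp only [Nat.cast_zero, List.drop_zero, List.nil_append] at hb
  simp [hb]
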